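-- pv_equiv track=rewrite | github.com/maikroservice/threaduler | app/dependencies.py | notion_blocks_to_post_chunks
-- ===== SOURCE A (Python) =====
-- def notion_blocks_to_post_chunks(blocks):
--     # split notion page content by divider and return a dictionary
--     # of raw notion blocks between two dividers
--     chunks = {}
--     counter = 0
--     for block in blocks:
--         if block["type"] == "divider":
--             counter += 1
--         else:
--             try:
--                 chunks[counter].append(block)
--             except KeyError:
--                 chunks[counter] = []
--                 chunks[counter].append(block)
--     return chunks
-- ===== SOURCE B (Python) =====
-- def notion_blocks_to_post_chunks(blocks):
--     # run-based: walk maximal runs of non-divider blocks and assign each whole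
--     # run at once to its cumulative-divider-count key
--     chunks = {}
--     counter = 0
--     rest = blocks
--     while rest:
--         if rest[0]["type"] == "divider":
--             counter += 1
--             rest = rest[1:]
--         else:
--             k = 1
--             while k < len(rest) and rest[k]["type"] != "divider":
--                 k += 1
--             chunks[counter] = rest[:k]
--             rest = rest[k:]
--     return chunks
-- ===== Notes on version B (the rewrite author's own statement) =====
-- stated objective: alternative
-- what changed: B replaces A's per-element loop with dict try/except appends by a run-based walk that slices off each maximal non-divider run and assigns it at once to its cumulative-divider-count key.
import Mathlib
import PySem

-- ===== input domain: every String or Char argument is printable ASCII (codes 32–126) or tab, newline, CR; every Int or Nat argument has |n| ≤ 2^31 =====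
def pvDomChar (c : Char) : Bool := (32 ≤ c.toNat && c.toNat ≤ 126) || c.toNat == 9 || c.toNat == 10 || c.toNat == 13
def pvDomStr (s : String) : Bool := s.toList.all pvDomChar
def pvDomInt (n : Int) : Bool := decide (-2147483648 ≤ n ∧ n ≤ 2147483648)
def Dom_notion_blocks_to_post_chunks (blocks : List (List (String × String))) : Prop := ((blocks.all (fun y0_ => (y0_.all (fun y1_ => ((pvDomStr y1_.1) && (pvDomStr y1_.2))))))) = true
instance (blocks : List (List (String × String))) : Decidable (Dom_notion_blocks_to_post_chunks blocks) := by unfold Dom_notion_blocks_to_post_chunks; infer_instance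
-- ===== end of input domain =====

-- B replaces A's per-element dict try/except insertion by a run-based walk that
-- assigns each maximal non-divider run at once to its cumulative-divider-count key
-- (alternative decomposition, same asymptotic cost).


-- ===== PORT A =====
-- block["type"]: first-match lookup in the association list (dict convention)
def pvBT (b : List (String × String)) : Option String := (PySem.Dict.mk b).get? "type"

-- one iteration of A's for-loop over (chunks, counter)
def pvStepA (st : PySem.Dict Int (List (List (String × String))) × Int)
    (block : List (String × String)) : PySem.Dict Int (List (List (String × String))) × Int :=
  if pvBT block = some "divider" then (st.1, st.2 + 1)
  else
    match st.1.get? st.2 with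
    | some _ => (st.1.modify st.2 [] (fun l => l ++ [block]), st.2)      -- chunks[counter].append(block)
    | none   => ((st.1.insert st.2 []).modify st.2 [] (fun l => l ++ [block]), st.2)  -- chunks[counter] = []; append

def notion_blocks_to_post_chunks (blocks : List (List (String × String))) : List (Int × List (List (String × String))) :=
  (blocks.foldl pvStepA (PySem.Dict.empty, 0)).1.items

-- ===== PORT B =====
def pvIsDiv (b : List (String × String)) : Bool := pvBT b == some "divider"

-- B's while-loop: consume one divider or one whole non-divider run per step
def pvRuns (counter : Int) : List (List (String × String)) → List (Int × List (List (String × String)))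
  | [] => []
  | b :: rest =>
    if pvIsDiv b then pvRuns (counter + 1) rest
    else (counter, b :: rest.takeWhile (fun x => !pvIsDiv x)) ::
           pvRuns counter (rest.dropWhile (fun x => !pvIsDiv x))
termination_by l => l.length
decreasing_by
  · simp
  · exact Nat.lt_succ_of_le (List.length_dropWhile_le _ _)

def notion_blocks_to_post_chunks_alt (blocks : List (List (String × String))) : List (Int × List (List (String × String))) :=
  pvRuns 0 blocks

-- ===== PRECONDITION & SPEC =====
-- Pre_ excludes blocks missing the "type" key: Python A raises KeyError there.
def Pre_notion_blocks_to_post_chunks (blocks : List (List (String × String))) : Prop :=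
  ∀ b ∈ blocks, (pvBT b).isSome = true
instance (blocks : List (List (String × String))) : Decidable (Pre_notion_blocks_to_post_chunks blocks) := by unfold Pre_notion_blocks_to_post_chunks; infer_instance

def pvWitness_notion_blocks_to_post_chunks : (List (List (String × String))) :=
  [[("type", "paragraph")], [("type", "divider")], [("type", "divider")], [("type", "heading_1")], [("type", "paragraph")]]

def Spec_notion_blocks_to_post_chunks (blocks : List (List (String × String))) (out : List (Int × List (List (String × String)))) : Prop := out = notion_blocks_to_post_chunks_alt blocks
instance (blocks : List (List (String × String))) (out : List (Int × List (List (String × String)))) : Decidable (Spec_notion_blocks_to_post_chunks blocks out) := by unfold Spec_notion_blocks_to_post_chunks; infer_instance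

-- ===== CLAIM (what is proved, stated in full; the proofs are below) =====
def Claim_equal_notion_blocks_to_post_chunks : Prop := ∀ (blocks : List (List (String × String))), Dom_notion_blocks_to_post_chunks blocks → Pre_notion_blocks_to_post_chunks blocks → Spec_notion_blocks_to_post_chunks blocks (notion_blocks_to_post_chunks blocks)

-- ===== LEMMAS AND PROOFS =====

-- get? misses a list whose keys all differ from c
lemma pv_get?_fresh (pre : List (Int × List (List (String × String)))) (c : Int)
    (h : ∀ p ∈ pre, p.1 ≠ c) : (PySem.Dict.mk pre).get? c = none := by
  have hf : pre.find? (fun p => p.1 == c) = none :=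
    List.find?_eq_none.mpr (fun p hp => by simpa using h p hp)
  simp [PySem.Dict.get?, hf]

-- inserting a fresh key appends
lemma pv_insert_fresh (pre : List (Int × List (List (String × String)))) (c : Int) (v : List (List (String × String)))
    (h : ∀ p ∈ pre, p.1 ≠ c) : (PySem.Dict.mk pre).insert c v = PySem.Dict.mk (pre ++ [(c, v)]) := by
  have hc : (PySem.Dict.mk pre).contains c = false := by
    exact List.any_eq_false.mpr (fun p hp => by simpa using h p hp)
  simp [PySem.Dict.insert, hc]

-- get? finds the last entry when all earlier keys differ
lemma pv_get?_last (pre : List (Int × List (List (String × String)))) (c : Int) (acc : List (List (String × String)))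
    (h : ∀ p ∈ pre, p.1 ≠ c) : (PySem.Dict.mk (pre ++ [(c, acc)])).get? c = some acc := by
  have hf : pre.find? (fun p => p.1 == c) = none :=
    List.find?_eq_none.mpr (fun p hp => by simpa using h p hp)
  simp [PySem.Dict.get?, List.find?_append, hf]

-- overwriting the last entry's key rewrites only that entry
lemma pv_insert_last' (pre : List (Int × List (List (String × String)))) (c : Int)
    (acc v : List (List (String × String)))
    (h : ∀ p ∈ pre, p.1 ≠ c) :
    (PySem.Dict.mk (pre ++ [(c, acc)])).insert c v = PySem.Dict.mk (pre ++ [(c, v)]) := by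
  have hc : (PySem.Dict.mk (pre ++ [(c, acc)])).contains c = true := by
    simp [PySem.Dict.contains]
  simp only [PySem.Dict.insert, hc, if_true]
  congr 1
  simp only [List.map_append]
  congr 1
  · rw [List.map_congr_left (g := id) (fun p hp => by simp [h p hp]), List.map_id]
  · simp

-- one non-divider run of the foldl only extends the current (last) entry
lemma pv_runL (run : List (List (String × String)))
    (hrun : ∀ x ∈ run, pvIsDiv x = false) :
    ∀ (rest : List (List (String × String))) (pre : List (Int × List (List (String × String))))
      (acc : List (List (String × String))) (counter : Int),
      (∀ p ∈ pre, p.1 < counter) →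
      (run ++ rest).foldl pvStepA (PySem.Dict.mk (pre ++ [(counter, acc)]), counter)
        = rest.foldl pvStepA (PySem.Dict.mk (pre ++ [(counter, acc ++ run)]), counter) := by
  induction run with
  | nil => intro rest pre acc counter _; simp
  | cons x run' ih =>
    intro rest pre acc counter hpre
    have hne : ∀ p ∈ pre, p.1 ≠ counter := fun p hp => ne_of_lt (hpre p hp)
    have hx : pvIsDiv x = false := hrun x (List.mem_cons_self ..)
    have hxd : ¬ (pvBT x = some "divider") := by
      intro hcontra; simp [pvIsDiv, hcontra] at hx
    have hget := pv_get?_last pre counter acc hne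
    have hstep : pvStepA (PySem.Dict.mk (pre ++ [(counter, acc)]), counter) x
        = (PySem.Dict.mk (pre ++ [(counter, acc ++ [x])]), counter) := by
      simp only [pvStepA, hxd, if_false, hget]
      simp [PySem.Dict.modify, PySem.Dict.getD_eq_get?_getD, hget,
            pv_insert_last' pre counter acc (acc ++ [x]) hne]
    simp only [List.cons_append, List.foldl_cons, hstep]
    rw [ih (fun x hx => hrun x (List.mem_cons_of_mem _ hx)) rest pre (acc ++ [x]) counter hpre]
    simp

-- main invariant: the fold from (pre, counter) with all keys of pre below counter
-- produces pre followed by B's runs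
lemma pv_main : ∀ (n : Nat) (blocks : List (List (String × String))), blocks.length ≤ n →
    ∀ (pre : List (Int × List (List (String × String)))) (counter : Int),
      (∀ p ∈ pre, p.1 < counter) →
      (blocks.foldl pvStepA (PySem.Dict.mk pre, counter)).1.items
        = pre ++ pvRuns counter blocks := by
  intro n
  induction n with
  | zero =>
    intro blocks hlen pre counter _
    have : blocks = [] := List.eq_nil_of_length_eq_zero (Nat.le_zero.mp hlen)
    subst this; simp [pvRuns]
  | succ m ih =>
    intro blocks hlen pre counter hpre
    match blocks with
    | [] => simp [pvRuns]
    | b :: rest =>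
      have hne : ∀ p ∈ pre, p.1 ≠ counter := fun p hp => ne_of_lt (hpre p hp)
      by_cases hdiv : pvIsDiv b = true
      · have hbt : pvBT b = some "divider" := by
          simpa [pvIsDiv] using hdiv
        have hstep : pvStepA (PySem.Dict.mk pre, counter) b = (PySem.Dict.mk pre, counter + 1) := by
          simp [pvStepA, hbt]
        have hpre' : ∀ p ∈ pre, p.1 < counter + 1 :=
          fun p hp => lt_trans (hpre p hp) (by omega)
        simp only [List.foldl_cons, hstep]
        rw [ih rest (by simpa using Nat.lt_succ_iff.mp (Nat.lt_of_lt_of_le (by simp) hlen)) pre (counter + 1) hpre']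
        simp [pvRuns, hdiv]
      · have hx : pvIsDiv b = false := by simpa using hdiv
        have hxd : ¬ (pvBT b = some "divider") := by
          intro hcontra; simp [pvIsDiv, hcontra] at hx
        have hget := pv_get?_fresh pre counter hne
        have hstep : pvStepA (PySem.Dict.mk pre, counter) b
            = (PySem.Dict.mk (pre ++ [(counter, [b])]), counter) := by
          simp only [pvStepA, hxd, if_false, hget]
          rw [pv_insert_fresh pre counter [] hne]
          simp [PySem.Dict.modify, PySem.Dict.getD_eq_get?_getD,
                pv_get?_last pre counter [] hne,
                pv_insert_last' pre counter [] [b] hne]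
        simp only [List.foldl_cons, hstep]
        have hq : ∀ x ∈ rest.takeWhile (fun x => !pvIsDiv x), pvIsDiv x = false := by
          intro x hx'
          have := List.mem_takeWhile_imp hx'
          simpa using this
        have hsplit : rest = rest.takeWhile (fun x => !pvIsDiv x) ++ rest.dropWhile (fun x => !pvIsDiv x) :=
          (List.takeWhile_append_dropWhile).symm
        rw [show rest.foldl pvStepA (PySem.Dict.mk (pre ++ [(counter, [b])]), counter)
              = (rest.takeWhile (fun x => !pvIsDiv x) ++ rest.dropWhile (fun x => !pvIsDiv x)).foldl
                  pvStepA (PySem.Dict.mk (pre ++ [(counter, [b])]), counter) from by rw [← hsplit]]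
        rw [pv_runL _ hq _ pre [b] counter hpre]
        have hrunseq : pvRuns counter (b :: rest)
            = (counter, b :: rest.takeWhile (fun x => !pvIsDiv x)) ::
                pvRuns counter (rest.dropWhile (fun x => !pvIsDiv x)) := by
          rw [pvRuns]; simp [hx]
        match hdrop : rest.dropWhile (fun x => !pvIsDiv x) with
        | [] =>
          simp [hrunseq, hdrop, pvRuns]
        | d :: rest2 =>
          have hd : pvIsDiv d = true := by
            have H := List.head?_dropWhile_not (fun x => !pvIsDiv x) rest
            rw [hdrop] at H
            simpa using H
          have hdbt : pvBT d = some "divider" := by simpa [pvIsDiv] using hd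
          have hstep2 : pvStepA (PySem.Dict.mk (pre ++ [(counter, [b] ++ rest.takeWhile (fun x => !pvIsDiv x))]), counter) d
              = (PySem.Dict.mk (pre ++ [(counter, [b] ++ rest.takeWhile (fun x => !pvIsDiv x))]), counter + 1) := by
            simp [pvStepA, hdbt]
          have hlen2 : rest2.length ≤ m := by
            have h1 : (rest.dropWhile (fun x => !pvIsDiv x)).length ≤ rest.length :=
              List.length_dropWhile_le _ _
            rw [hdrop] at h1
            simp at h1 hlen
            omega
          have hpre2 : ∀ p ∈ pre ++ [(counter, [b] ++ rest.takeWhile (fun x => !pvIsDiv x))], p.1 < counter + 1 := by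
            intro p hp
            rcases List.mem_append.mp hp with h | h
            · exact lt_trans (hpre p h) (by omega)
            · rcases List.mem_singleton.mp h with rfl
              simp
          simp only [List.foldl_cons, hstep2]
          rw [ih rest2 hlen2 _ (counter + 1) hpre2]
          rw [hrunseq, hdrop]
          rw [pvRuns]
          simp [hd]

-- ===== VERDICT (by name: the statement is the Claim_ definition above) =====
theorem notion_blocks_to_post_chunks_spec : Claim_equal_notion_blocks_to_post_chunks := by
  intro blocks _ _
  unfold Spec_notion_blocks_to_post_chunks notion_blocks_to_post_chunks notion_blocks_to_post_chunks_alt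
  have := pv_main blocks.length blocks (le_refl _) [] 0 (by simp)
  simpa [PySem.Dict.empty] using this
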